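-- pv_equiv track=rewrite | github.com/fwyzard/circles | make_circles.py | extract_process_name
-- ===== SOURCE A (Python) =====
-- def extract_process_name(data):
--   name = None
--   to_be_removed = []
--   for module in data:
--     if module.startswith('process '):
--       to_be_removed.append(module)
--       if name is None:
--         name = module.replace('process ', '')
--       else:
--         name = 'Total'
--
--   # remove the processes from the data set
--   for module in to_be_removed:
--     del data[module]
--
--   # if no process name was found, use a default value
--   if name is None:
--     name = 'Total'
--
--   return name
-- ===== SOURCE B (Python) =====
-- def extract_process_name(data):
--   it = iter(list(data))
--   for module in it:
--     if module.startswith('process '):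
--       del data[module]
--       name = module.replace('process ', '')
--       for later in it:
--         if later.startswith('process '):
--           del data[later]
--           name = 'Total'
--       return name
--   return 'Total'
-- ===== Notes on version B (the rewrite author's own statement) =====
-- stated objective: alternative
-- what changed: Replaces A's single accumulate-then-delete pass (None->name->'Total' running state plus a to_be_removed list) with an early-returning staged scan over one shared iterator: the outer loop finds the first 'process ' key and returns immediately after an inner loop sweeps the remaining entries, deleting matches as it goes and demoting the name to 'Total' if a second match exists.
import Mathlib
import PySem

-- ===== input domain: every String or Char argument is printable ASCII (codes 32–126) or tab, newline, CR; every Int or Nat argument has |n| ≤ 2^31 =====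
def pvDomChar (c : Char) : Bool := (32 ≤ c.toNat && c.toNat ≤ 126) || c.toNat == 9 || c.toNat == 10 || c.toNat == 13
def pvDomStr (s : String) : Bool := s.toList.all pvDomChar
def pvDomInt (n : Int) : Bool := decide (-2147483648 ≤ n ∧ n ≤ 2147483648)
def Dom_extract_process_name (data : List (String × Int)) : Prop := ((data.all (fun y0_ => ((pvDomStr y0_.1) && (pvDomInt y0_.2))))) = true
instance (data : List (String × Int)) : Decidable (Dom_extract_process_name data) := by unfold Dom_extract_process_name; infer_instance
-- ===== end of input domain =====

-- B replaces A's single accumulate-then-delete loop (None->name->'Total' state machine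
-- plus a to_be_removed list) by an early-returning staged scan over one iterator: find
-- the first match, then sweep the remainder (objective: alternative). Both Pythons also
-- delete the matching keys from `data` in place; the equivalence proved here is about
-- the RETURN value only (the keys removed are the same in both).

-- ===== PORT A =====
-- one loop step of A: state = (name, to_be_removed)
def pvStepA (st : Option String × List String) (module : String × Int) : Option String × List String :=
  if PySem.Str.startswith module.1 "process " then
    (match st.1 with
     | none => some (PySem.Str.replace module.1 "process " "")
     | some _ => some "Total",
     st.2 ++ [module.1])
  else st

def extract_process_name (data : List (String × Int)) : String :=
  let st := data.foldl pvStepA (none, [])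
  -- (the deletion loop over to_be_removed mutates data only; no effect on the return value)
  match st.1 with
  | none => "Total"
  | some name => name

-- ===== PORT B =====
-- inner loop: sweep the rest of the iterator after the first match was found
def pvScanRest : List (String × Int) → String → String
  | [], name => name
  | later :: t, name =>
      if PySem.Str.startswith later.1 "process " then pvScanRest t "Total"
      else pvScanRest t name

-- outer loop: look for the first match, early return via pvScanRest
def extract_process_name_alt : List (String × Int) → String
  | [] => "Total"
  | module :: t =>
      if PySem.Str.startswith module.1 "process " then
        pvScanRest t (PySem.Str.replace module.1 "process " "")
      else extract_process_name_alt t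

-- ===== PRECONDITION & SPEC =====
def Spec_extract_process_name (data : List (String × Int)) (out : String) : Prop := out = extract_process_name_alt data
instance (data : List (String × Int)) (out : String) : Decidable (Spec_extract_process_name data out) := by unfold Spec_extract_process_name; infer_instance

-- ===== CLAIM (what is proved, stated in full; the proofs are below) =====
def Claim_equal_extract_process_name : Prop := ∀ (data : List (String × Int)), Dom_extract_process_name data → Spec_extract_process_name data (extract_process_name data)

-- ===== LEMMAS AND PROOFS =====

-- once A's name state is `some x`, the rest of A's fold behaves exactly like B's inner sweep
theorem pvFoldA_some (t : List (String × Int)) :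
    ∀ (x : String) (acc : List String),
      (t.foldl pvStepA (some x, acc)).1 = some (pvScanRest t x) := by
  induction t with
  | nil => intro x acc; rfl
  | cons m r ih =>
      intro x acc
      rw [List.foldl_cons, pvScanRest]
      by_cases h : PySem.Str.startswith m.1 "process " = true
      · simp only [pvStepA, if_pos h]
        exact ih "Total" (acc ++ [m.1])
      · simp only [pvStepA, if_neg h]
        exact ih x acc

-- A's whole loop, read through its final match, is B's staged scan
theorem pvA_eq_alt (l : List (String × Int)) :
    ∀ (acc : List String),
      (match (l.foldl pvStepA (none, acc)).1 with
       | none => "Total"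
       | some name => name) = extract_process_name_alt l := by
  induction l with
  | nil => intro acc; rfl
  | cons m t ih =>
      intro acc
      rw [List.foldl_cons, extract_process_name_alt]
      by_cases h : PySem.Str.startswith m.1 "process " = true
      · simp only [pvStepA, if_pos h]
        rw [pvFoldA_some]
      · simp only [pvStepA, if_neg h]
        exact ih acc

-- ===== VERDICT (by name: the statement is the Claim_ definition above) =====
theorem extract_process_name_spec : Claim_equal_extract_process_name := by
  intro data _
  unfold Spec_extract_process_name extract_process_name
  exact pvA_eq_alt data []
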